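-- pv_equiv track=rewrite | github.com/TheSignPainter98/adjust-keys | adjustkeys/util.py | get_dicts_with_duplicate_field_values
-- ===== SOURCE A (Python) =====
-- def get_dicts_with_duplicate_field_values(data:[dict], key:object) -> dict:
--     seens:dict = {}
--     for datum in data:
--         value:object = datum[key]
--         if value in seens:
--             seens[value].append(datum)
--         else:
--             seens[value] = [datum]
--     return { p:seens[p] for p in seens if len(seens[p]) > 1 }
-- ===== SOURCE B (Python) =====
-- def get_dicts_with_duplicate_field_values(data, key):
--     counts = {}
--     for datum in data:
--         v = datum[key]
--         counts[v] = counts.get(v, 0) + 1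
--     result = {}
--     for datum in data:
--         v = datum[key]
--         if counts[v] > 1:
--             result.setdefault(v, []).append(datum)
--     return result
-- ===== Notes on version B (the rewrite author's own statement) =====
-- stated objective: alternative
-- what changed: B first builds a value-frequency table, then collects only the dicts whose value is duplicated in a filtered second scan over data, instead of A's group-everything-into-lists-then-filter-the-dict approach.
import Mathlib
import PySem

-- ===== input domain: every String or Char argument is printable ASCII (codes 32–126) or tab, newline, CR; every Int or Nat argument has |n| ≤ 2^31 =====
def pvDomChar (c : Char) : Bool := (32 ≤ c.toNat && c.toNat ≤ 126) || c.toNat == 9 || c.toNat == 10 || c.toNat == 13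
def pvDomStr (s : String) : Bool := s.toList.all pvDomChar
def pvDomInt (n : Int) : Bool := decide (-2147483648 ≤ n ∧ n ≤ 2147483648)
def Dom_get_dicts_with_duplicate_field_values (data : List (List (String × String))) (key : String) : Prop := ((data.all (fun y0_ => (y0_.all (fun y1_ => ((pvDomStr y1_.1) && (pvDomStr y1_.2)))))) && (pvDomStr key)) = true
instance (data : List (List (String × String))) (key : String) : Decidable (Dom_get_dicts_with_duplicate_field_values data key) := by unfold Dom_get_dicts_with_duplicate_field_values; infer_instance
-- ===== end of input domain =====

-- B replaces A's group-into-lists-then-filter-the-dict strategy by a value-frequency count pass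
-- followed by a filtered second scan over data (alternative decomposition, same asymptotic cost).


-- ===== PORT A =====
-- datum[key] is ported as (PySem.Dict.mk datum).getD key "" — exact under Pre_ (key present in every datum).
def get_dicts_with_duplicate_field_values (data : List (List (String × String))) (key : String) : List (String × List (List (String × String))) :=
  let seens : PySem.Dict String (List (List (String × String))) :=
    data.foldl (fun seens datum =>
      let value := (PySem.Dict.mk datum).getD key ""
      if seens.contains value then
        seens.modify value [] (· ++ [datum])        -- seens[value].append(datum)
      else
        seens.insert value [datum]) PySem.Dict.empty
  -- { p: seens[p] for p in seens if len(seens[p]) > 1 }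
  (seens.keys.foldl (fun (acc : PySem.Dict String (List (List (String × String)))) p =>
      if (seens.getD p []).length > 1 then acc.insert p (seens.getD p []) else acc)
    PySem.Dict.empty).items

-- ===== PORT B =====
def get_dicts_with_duplicate_field_values_alt (data : List (List (String × String))) (key : String) : List (String × List (List (String × String))) :=
  let counts : PySem.Dict String Int :=
    data.foldl (fun c datum =>
      let v := (PySem.Dict.mk datum).getD key ""
      c.insert v (c.getD v 0 + 1)) PySem.Dict.empty  -- counts[v] = counts.get(v, 0) + 1
  (data.foldl (fun (res : PySem.Dict String (List (List (String × String)))) datum =>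
      let v := (PySem.Dict.mk datum).getD key ""
      if counts.getD v 0 > 1 then
        (res.setdefault v []).modify v [] (· ++ [datum])  -- result.setdefault(v, []).append(datum)
      else res)
    PySem.Dict.empty).items

-- ===== PRECONDITION & SPEC =====
-- Pre_ excludes exactly the inputs on which Python A raises KeyError: some datum lacking the key.
def Pre_get_dicts_with_duplicate_field_values (data : List (List (String × String))) (key : String) : Prop :=
  ∀ d ∈ data, (PySem.Dict.mk d).contains key = true
instance (data : List (List (String × String))) (key : String) : Decidable (Pre_get_dicts_with_duplicate_field_values data key) := by unfold Pre_get_dicts_with_duplicate_field_values; infer_instance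

def pvWitness_get_dicts_with_duplicate_field_values : (List (List (String × String))) × String :=
  ([[("k", "a")], [("k", "a")], [("k", "b")]], "k")

def Spec_get_dicts_with_duplicate_field_values (data : List (List (String × String))) (key : String) (out : List (String × List (List (String × String)))) : Prop := out = get_dicts_with_duplicate_field_values_alt data key
instance (data : List (List (String × String))) (key : String) (out : List (String × List (List (String × String)))) : Decidable (Spec_get_dicts_with_duplicate_field_values data key out) := by unfold Spec_get_dicts_with_duplicate_field_values; infer_instance

-- ===== CLAIM (what is proved, stated in full; the proofs are below) =====
def Claim_equal_get_dicts_with_duplicate_field_values : Prop := ∀ (data : List (List (String × String))) (key : String), Dom_get_dicts_with_duplicate_field_values data key → Pre_get_dicts_with_duplicate_field_values data key → Spec_get_dicts_with_duplicate_field_values data key (get_dicts_with_duplicate_field_values data key)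

-- ===== LEMMAS AND PROOFS =====

-- Dict.modify is insert of the updated getD (items-level rfl).
theorem pv_modify_eq {ν : Type} (d : PySem.Dict String ν) (k : String) (dflt : ν) (f : ν → ν) :
    d.modify k dflt f = d.insert k (f (d.getD k dflt)) := PySem.Dict.ext_iff.mpr rfl

-- setdefault followed by an overwrite at the same key is the plain overwrite.
theorem pv_setdefault_modify {ν : Type} (d : PySem.Dict String ν) (k : String) (dflt : ν) (f : ν → ν) :
    (d.setdefault k dflt).modify k dflt f = d.modify k dflt f := by
  rw [pv_modify_eq, pv_modify_eq, PySem.Dict.getD_setdefault_self]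
  by_cases h : d.contains k = true
  · rw [PySem.Dict.setdefault_of_contains _ _ h]
  · rw [PySem.Dict.setdefault_of_not_contains _ _ (by simpa using h),
      PySem.Dict.insert_insert_self]

-- The grouping fold: lookup is the filtered sublist.
theorem pv_group_getD {α : Type} (f : α → String) (data : List α) (c : String) :
    (data.foldl (fun (s : PySem.Dict String (List α)) d => s.modify (f d) [] (· ++ [d]))
      PySem.Dict.empty).getD c []
    = data.filter (fun d => f d == c) := by
  have h := PySem.Dict.getD_foldl_modify_append (l := data.map (fun d => (f d, d)))
      (d := (PySem.Dict.empty : PySem.Dict String (List α))) (c := c)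
  rw [List.foldl_map] at h
  simpa [List.filter_map, Function.comp_def] using h

theorem pv_group_keys {α : Type} (f : α → String) (data : List α) :
    (data.foldl (fun (s : PySem.Dict String (List α)) d => s.modify (f d) [] (· ++ [d]))
      PySem.Dict.empty).keys = PySem.Set.ofList (data.map f) := by
  rw [PySem.Dict.keys_foldl_modify_key]
  simp [PySem.Set.update_nil_left]

theorem pv_group_nodup {α : Type} (f : α → String) (data : List α) :
    (data.foldl (fun (s : PySem.Dict String (List α)) d => s.modify (f d) [] (· ++ [d]))
      PySem.Dict.empty).keys.Nodup :=
  PySem.Dict.nodup_keys_foldl_modify_key _ _ _ _ _ PySem.Dict.nodup_keys_empty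

-- A's loop body: the contains test collapses into an unconditional modify.
theorem pv_A_step {α : Type} (f : α → String) (s : PySem.Dict String (List α)) (d : α) :
    (if s.contains (f d) then s.modify (f d) [] (· ++ [d]) else s.insert (f d) [d])
    = s.modify (f d) [] (· ++ [d]) := by
  by_cases h : s.contains (f d) = true
  · simp [h]
  · rw [if_neg (by simpa using h), pv_modify_eq,
      PySem.Dict.getD_of_not_contains _ _ (by simpa using h)]
    rfl

-- The dict comprehension: a conditional-insert fold over fresh nodup keys appends.
theorem pv_fold_if_insert {ν : Type} (P : String → Prop) [DecidablePred P] (g : String → ν) :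
    ∀ (l : List String) (acc : PySem.Dict String ν), l.Nodup →
      (∀ k ∈ l, acc.contains k = false) →
      (l.foldl (fun a p => if P p then a.insert p (g p) else a) acc).items
        = acc.items ++ (l.filter (fun p => decide (P p))).map (fun p => (p, g p)) := by
  intro l
  induction l with
  | nil => intro acc _ _; simp
  | cons k t ih =>
    intro acc hnd hfresh
    simp only [List.foldl_cons, List.filter_cons]
    by_cases hP : P k
    · rw [if_pos hP, ih _ hnd.of_cons ?_,
        PySem.Dict.items_insert_of_not_contains _ _ (hfresh k (by simp))]
      · simp [hP]
      · intro k' hk'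
        rw [PySem.Dict.contains_insert]
        have : k' ≠ k := by rintro rfl; exact (List.nodup_cons.mp hnd).1 hk'
        simp [this, hfresh k' (by simp [hk'])]
    · rw [if_neg hP, ih _ hnd.of_cons (fun k' hk' => hfresh k' (by simp [hk']))]
      simp [hP]

-- dedup commutes with filter.
theorem pv_ofList_filter (p : String → Bool) (l : List String) :
    PySem.Set.ofList (l.filter p) = (PySem.Set.ofList l).filter p := by
  induction l using List.reverseRecOn with
  | nil => rfl
  | append_singleton t x ih =>
    by_cases hx : p x = true
    · simp only [List.filter_append, List.filter_cons, hx, if_true, List.filter_nil]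
      rw [PySem.Set.ofList_append_singleton, PySem.Set.ofList_append_singleton, ih,
        PySem.Set.add_eq_ite, PySem.Set.add_eq_ite]
      by_cases hm : x ∈ PySem.Set.ofList t
      · simp [hm, List.mem_filter.mpr ⟨hm, hx⟩]
      · have h2 : x ∉ List.filter p (PySem.Set.ofList t) := fun h => hm (List.mem_filter.mp h).1
        simp [hm, h2, List.filter_append, hx]
    · simp only [List.filter_append, List.filter_cons, hx, Bool.false_eq_true, if_false,
        List.filter_nil, List.append_nil, ih]
      rw [PySem.Set.ofList_append_singleton, PySem.Set.add_eq_ite]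
      by_cases hm : x ∈ PySem.Set.ofList t
      · simp [hm]
      · simp [hm, List.filter_append, hx]

-- The whole equivalence, stated for an arbitrary key-extraction function f.
theorem pv_main {α : Type} (f : α → String) (data : List α) :
    (let seens := data.foldl (fun (s : PySem.Dict String (List α)) d =>
        if s.contains (f d) then s.modify (f d) [] (· ++ [d]) else s.insert (f d) [d])
        PySem.Dict.empty
     (seens.keys.foldl (fun (acc : PySem.Dict String (List α)) p =>
        if (seens.getD p []).length > 1 then acc.insert p (seens.getD p []) else acc)
      PySem.Dict.empty).items)
    = (let counts := data.foldl (fun (c : PySem.Dict String Int) d =>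
          c.insert (f d) (c.getD (f d) 0 + 1)) PySem.Dict.empty
       (data.foldl (fun (res : PySem.Dict String (List α)) d =>
          if counts.getD (f d) 0 > 1 then (res.setdefault (f d) []).modify (f d) [] (· ++ [d])
          else res) PySem.Dict.empty).items) := by
  simp only []
  -- A's first fold is the grouping fold
  have hA1 : data.foldl (fun (s : PySem.Dict String (List α)) d =>
      if s.contains (f d) then s.modify (f d) [] (· ++ [d]) else s.insert (f d) [d])
      PySem.Dict.empty
      = data.foldl (fun s d => s.modify (f d) [] (· ++ [d])) PySem.Dict.empty := by
    exact PySem.List.foldl_congr_mem _ _ _ _ (fun s d _ => pv_A_step f s d)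
  rw [hA1]
  -- counts lookups are occurrence counts
  have hc : ∀ v, (data.foldl (fun (c : PySem.Dict String Int) d =>
      c.insert (f d) (c.getD (f d) 0 + 1)) PySem.Dict.empty).getD v 0
      = ((data.map f).count v : Int) := by
    intro v
    rw [show List.foldl (fun (c : PySem.Dict String Int) d => c.insert (f d) (c.getD (f d) 0 + 1))
        PySem.Dict.empty data
      = List.foldl (fun (c : PySem.Dict String Int) x => c.insert x (c.getD x 0 + 1))
        PySem.Dict.empty (data.map f) from
        (List.foldl_map (f := f)
          (g := fun (c : PySem.Dict String Int) x => c.insert x (c.getD x 0 + 1))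
          (l := data) (init := PySem.Dict.empty)).symm,
      PySem.Dict.getD_foldl_insert_add_one]
    simp
  -- B's loop is the grouping fold over the filtered data
  have hB1 : data.foldl (fun (res : PySem.Dict String (List α)) d =>
      if (data.foldl (fun (c : PySem.Dict String Int) d =>
        c.insert (f d) (c.getD (f d) 0 + 1)) PySem.Dict.empty).getD (f d) 0 > 1 then
        (res.setdefault (f d) []).modify (f d) [] (· ++ [d]) else res) PySem.Dict.empty
      = ((data.filter (fun d => decide (1 < (data.map f).count (f d)))).foldl
          (fun (res : PySem.Dict String (List α)) d => res.modify (f d) [] (· ++ [d]))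
          PySem.Dict.empty) := by
    rw [List.foldl_filter]
    apply PySem.List.foldl_congr_mem
    intro res d _
    simp only [hc, pv_setdefault_modify, gt_iff_lt, decide_eq_true_eq, Nat.one_lt_cast]
  rw [hB1]
  -- name the pieces
  have hnodA := pv_group_nodup f data
  have hnodB := pv_group_nodup f (data.filter (fun d => decide (1 < (data.map f).count (f d))))
  -- A's comprehension appends the surviving (key, group) pairs
  rw [pv_fold_if_insert _ _ _ _ hnodA (fun k _ => PySem.Dict.contains_empty k)]
  -- B's dict as items of the grouping fold over filtered data
  rw [PySem.Dict.items_eq_map_keys _ hnodB []]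
  rw [pv_group_keys, pv_group_keys]
  simp only [pv_group_getD]
  -- B's key list: filter commutes through map and dedup
  have hkeys : (data.filter (fun d => decide (1 < (data.map f).count (f d)))).map f
      = (data.map f).filter (fun v => decide (1 < (data.map f).count v)) := by
    rw [List.filter_map]; rfl
  rw [hkeys, pv_ofList_filter]
  simp only [show (PySem.Dict.empty : PySem.Dict String (List α)).items = [] from rfl,
    List.nil_append]
  -- the two filters on the key set agree, and so do the groups at surviving keys
  have hlen : ∀ c, (data.filter (fun d => f d == c)).length = (data.map f).count c := by
    intro c
    rw [List.count_eq_countP, List.countP_map, ← List.countP_eq_length_filter]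
    rfl
  have hfilters : List.filter
        (fun p => decide ((List.filter (fun d => f d == p) data).length > 1))
        (PySem.Set.ofList (List.map f data))
      = List.filter (fun v => decide (1 < List.count v (List.map f data)))
        (PySem.Set.ofList (List.map f data)) :=
    List.filter_congr (fun c _ => by simp only [gt_iff_lt, hlen c])
  rw [hfilters]
  apply List.map_congr_left
  intro c hc'
  congr 1
  conv_rhs => rw [List.filter_filter]
  apply List.filter_congr
  intro d _
  by_cases hd : f d == c
  · have hde : f d = c := by simpa using hd
    have hcnd : decide (1 < List.count (f d) (List.map f data)) = true := by
      rw [hde]; exact (List.mem_filter.mp hc').2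
    simp [hd, hcnd]
  · simp [hd]

-- ===== VERDICT (by name: the statement is the Claim_ definition above) =====
theorem get_dicts_with_duplicate_field_values_spec : Claim_equal_get_dicts_with_duplicate_field_values := by
  intro data key _ _
  unfold Spec_get_dicts_with_duplicate_field_values
  unfold get_dicts_with_duplicate_field_values get_dicts_with_duplicate_field_values_alt
  exact pv_main (fun d => (PySem.Dict.mk d).getD key "") data
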